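-- pv_equiv track=rewrite | github.com/danny-hunt/Problems | justify_text/justify_text.py | create_line
-- ===== SOURCE A (Python) =====
-- import math
--
-- def create_line(words, length_count, k):
--     if len(words) > 1:
--         spaces = [0] * (len(words) - 1)
--
--         number_of_spaces = k - length_count + len(spaces)
--         counter = 0
--         while number_of_spaces > 0:
--             spaces[counter % (len(words)-1)] += 1
--             number_of_spaces -= 1
--             counter += 1
--
--         return_string = ""
--         for index, word in enumerate(words):
--             if index > 0:
--                 return_string += " " * spaces[index - 1]
--             return_string += word
--     else:
--         return_string = " " * math.ceil((k - length_count)/ 2) + words[0] + " " * math.floor((k - length_count)/ 2)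
--     return return_string
-- ===== SOURCE B (Python) =====
-- def create_line(words, length_count, k):
--     if len(words) > 1:
--         gaps = len(words) - 1
--         total = k - length_count + gaps
--         if total > 0:
--             base, rem = divmod(total, gaps)
--         else:
--             base, rem = 0, 0
--         pieces = [words[0]]
--         for i, w in enumerate(words[1:]):
--             pieces.append(" " * (base + (1 if i < rem else 0)) + w)
--         return "".join(pieces)
--     pad = k - length_count
--     return " " * (pad - pad // 2) + words[0] + " " * (pad // 2)
-- ===== Notes on version B (the rewrite author's own statement) =====
-- stated objective: alternative
-- what changed: The one-space-at-a-time round-robin while loop is replaced by a closed-form divmod distribution (base+1 spaces to the first rem gaps) with the line assembled by joining pieces; the single-word branch uses integer arithmetic (pad - pad//2 and pad//2) instead of float ceil/floor.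
import Mathlib
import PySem

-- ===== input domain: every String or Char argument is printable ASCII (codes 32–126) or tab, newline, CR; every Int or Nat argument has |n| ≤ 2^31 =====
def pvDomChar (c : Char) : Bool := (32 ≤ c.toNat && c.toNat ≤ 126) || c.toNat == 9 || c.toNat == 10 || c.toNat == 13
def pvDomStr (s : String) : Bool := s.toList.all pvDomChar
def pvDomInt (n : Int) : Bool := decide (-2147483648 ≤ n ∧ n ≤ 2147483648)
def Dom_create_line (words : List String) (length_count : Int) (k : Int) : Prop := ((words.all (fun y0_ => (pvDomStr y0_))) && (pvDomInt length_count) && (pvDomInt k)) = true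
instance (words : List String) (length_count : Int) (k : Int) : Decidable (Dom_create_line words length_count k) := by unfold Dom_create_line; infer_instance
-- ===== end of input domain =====

-- B replaces A's one-space-at-a-time round-robin while loop by a closed-form divmod
-- distribution of the spaces over the gaps, and assembles the line by joining pieces.

-- ===== PORT A =====

-- the while loop: it runs exactly max(number_of_spaces, 0) times, bumping
-- spaces[counter % g] each iteration (counter and g are nonnegative, so Nat % is Python's %)
def fillA : Nat → Nat → Nat → List Int → List Int
  | 0, _, _, spaces => spaces
  | n + 1, c, g, spaces => fillA n (c + 1) g (spaces.set (c % g) (spaces.getD (c % g) 0 + 1))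

def create_line (words : List String) (length_count : Int) (k : Int) : String :=
  if words.length > 1 then
    let g := words.length - 1
    let spaces0 : List Int := List.replicate g 0
    let number_of_spaces : Int := k - length_count + (g : Int)
    let spaces := fillA number_of_spaces.toNat 0 g spaces0
    String.ofList ((PySem.List.enumerate words 0).foldl
      (fun acc p =>
        let acc := if p.1 > 0 then acc ++ List.replicate (PySem.List.pyGetD spaces (p.1 - 1) 0).toNat ' ' else acc
        acc ++ p.2.toList) [])
  else
    match words with
    | [] => ""  -- Python raises IndexError on words[0]; excluded by Pre_
    | w :: _ =>
      -- math.ceil((k-length_count)/2) = -((-(k-length_count)) // 2) and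
      -- math.floor((k-length_count)/2) = (k-length_count) // 2: exact, since |k-length_count| ≤ 2^32 < 2^53
      String.ofList (List.replicate (-(PySem.Int.floordiv (-(k - length_count)) 2)).toNat ' '
        ++ w.toList ++ List.replicate (PySem.Int.floordiv (k - length_count) 2).toNat ' ')

-- ===== PORT B =====

def create_line_alt (words : List String) (length_count : Int) (k : Int) : String :=
  if words.length > 1 then
    match words with
    | [] => ""  -- unreachable: length > 1
    | w0 :: rest =>
      let gaps : Int := (words.length : Int) - 1
      let total : Int := k - length_count + gaps
      let br : Int × Int := if total > 0 then (PySem.Int.floordiv total gaps, PySem.Int.mod total gaps) else (0, 0)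
      -- pieces = [words[0]] ++ [" "*(base + (1 if i < rem else 0)) + w …]; "".join is the fold
      String.ofList ((PySem.List.enumerate rest 0).foldl
        (fun acc p => acc ++ (List.replicate (br.1 + (if p.1 < br.2 then 1 else 0)).toNat ' ' ++ p.2.toList))
        w0.toList)
  else
    match words with
    | [] => ""  -- Python raises IndexError on words[0]; excluded by Pre_
    | w :: _ =>
      let pad := k - length_count
      String.ofList (List.replicate (pad - PySem.Int.floordiv pad 2).toNat ' '
        ++ w.toList ++ List.replicate (PySem.Int.floordiv pad 2).toNat ' ')

-- ===== PRECONDITION & SPEC =====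
-- A (and B) raise IndexError on words = [] (words[0]); that is all Pre_ excludes.
def Pre_create_line (words : List String) (length_count : Int) (k : Int) : Prop := words ≠ []
instance (words : List String) (length_count : Int) (k : Int) : Decidable (Pre_create_line words length_count k) := by unfold Pre_create_line; infer_instance
def pvWitness_create_line : List String × Int × Int := (["ab", "c", "d"], 4, 10)

def Spec_create_line (words : List String) (length_count : Int) (k : Int) (out : String) : Prop := out = create_line_alt words length_count k
instance (words : List String) (length_count : Int) (k : Int) (out : String) : Decidable (Spec_create_line words length_count k out) := by unfold Spec_create_line; infer_instance

-- ===== CLAIM (what is proved, stated in full; the proofs are below) =====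
def Claim_equal_create_line : Prop := ∀ (words : List String) (length_count : Int) (k : Int), Dom_create_line words length_count k → Pre_create_line words length_count k → Spec_create_line words length_count k (create_line words length_count k)

-- ===== LEMMAS AND PROOFS =====

-- successor of division/modulo by a variable positive divisor
lemma succ_div_mod (n g : Nat) (hg : 0 < g) :
    ((n + 1) / g = n / g + 1 ∧ (n + 1) % g = 0 ∧ n % g = g - 1) ∨
    ((n + 1) / g = n / g ∧ (n + 1) % g = n % g + 1 ∧ n % g + 1 < g) := by
  have h1 := Nat.div_add_mod n g
  have h2 := Nat.div_add_mod (n + 1) g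
  have h3 := Nat.mod_lt n hg
  have h4 := Nat.mod_lt (n + 1) hg
  have hle : n / g ≤ (n + 1) / g := Nat.div_le_div_right (Nat.le_succ n)
  have hle2 : (n + 1) / g ≤ n / g + 1 := by
    have hh := Nat.add_div_right n hg
    calc (n + 1) / g ≤ (n + g) / g := Nat.div_le_div_right (by omega)
      _ = n / g + 1 := hh
  rcases Nat.eq_or_lt_of_le hle with he | hlt
  · rw [← he] at h2
    right
    generalize hA : g * (n / g) = A at h1 h2
    omega
  · have hb : (n + 1) / g = n / g + 1 := Nat.le_antisymm hle2 hlt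
    rw [hb, Nat.mul_add, Nat.mul_one] at h2
    left
    generalize hA : g * (n / g) = A at h1 h2
    omega

-- closed form for the round-robin hit count: among 0..n-1, those ≡ i (mod g)
lemma cnt_closed (g i : Nat) (hg : 0 < g) (hi : i < g) (n : Nat) :
    (List.range n).countP (fun t => decide (t % g = i)) = n / g + (if i < n % g then 1 else 0) := by
  induction n with
  | zero => simp
  | succ n ih =>
    rw [List.range_succ, List.countP_append, ih]
    have hsingle : List.countP (fun t => decide (t % g = i)) [n] = if n % g = i then 1 else 0 := by
      simp [List.countP_cons]
    rw [hsingle]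
    rcases succ_div_mod n g hg with ⟨hd, hm, hr⟩ | ⟨hd, hm, hr⟩ <;> rw [hd, hm] <;>
      split_ifs <;> omega

-- the while loop adds, to each slot i, the number of counter values hitting it
lemma fillA_getD (g : Nat) (hg : 0 < g) (i : Nat) (hi : i < g) :
    ∀ (n c : Nat) (spaces : List Int), spaces.length = g →
    (fillA n c g spaces).getD i 0 =
      spaces.getD i 0 + ((List.range n).countP (fun t => decide ((c + t) % g = i)) : Int) := by
  intro n
  induction n with
  | zero => intro c spaces hl; simp [fillA]
  | succ n ih =>
    intro c spaces hl
    have hcm : c % g < g := Nat.mod_lt c hg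
    rw [fillA, ih (c + 1) _ (by simp [hl])]
    have hset : (spaces.set (c % g) (spaces.getD (c % g) 0 + 1)).getD i 0 =
        spaces.getD i 0 + (if c % g = i then 1 else 0) := by
      have hlt : c % g < spaces.length := by omega
      rcases eq_or_ne (c % g) i with h | h
      · subst h
        rw [List.getD_eq_getElem?_getD, List.getD_eq_getElem?_getD,
          List.getElem?_set_self hlt]
        simp [List.getElem?_eq_getElem hlt]
      · rw [List.getD_eq_getElem?_getD, List.getD_eq_getElem?_getD, List.getElem?_set_ne h]
        simp [h]
    have hcnt : (List.range (n + 1)).countP (fun t => decide ((c + t) % g = i)) =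
        (if c % g = i then 1 else 0) +
          (List.range n).countP (fun t => decide ((c + 1 + t) % g = i)) := by
      rw [List.range_succ_eq_map, List.countP_cons, List.countP_map]
      have : ((fun t => decide ((c + t) % g = i)) ∘ Nat.succ) =
          (fun t => decide ((c + 1 + t) % g = i)) := by
        funext t; simp only [Function.comp]
        have h' : c + Nat.succ t = c + 1 + t := by omega
        rw [h']
      rw [this]
      simp only [Nat.add_zero, decide_eq_true_eq]
      split_ifs <;> omega
    rw [hset, hcnt]
    split_ifs <;> push_cast <;> omega

-- the spaces array A builds, in B's closed form
lemma spaces_closed (g : Nat) (hg : 0 < g) (total : Int) (i : Nat) (hi : i < g) :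
    (fillA total.toNat 0 g (List.replicate g 0)).getD i 0 =
      (if total > 0 then (PySem.Int.floordiv total (g : Int), PySem.Int.mod total (g : Int)) else ((0 : Int), (0 : Int))).1 +
        (if (i : Int) < (if total > 0 then (PySem.Int.floordiv total (g : Int), PySem.Int.mod total (g : Int)) else ((0 : Int), (0 : Int))).2 then 1 else 0) := by
  have hbase := fillA_getD g hg i hi total.toNat 0 (List.replicate g 0) (by simp)
  have hzero : (List.replicate g (0 : Int)).getD i 0 = 0 := by
    rw [List.getD_eq_getElem?_getD]; simp [hi]
  have hcongr : (List.range total.toNat).countP (fun t => decide ((0 + t) % g = i)) =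
      (List.range total.toNat).countP (fun t => decide (t % g = i)) := by
    apply List.countP_congr; intro t _; simp
  rw [hbase, hzero, hcongr, cnt_closed g i hg hi]
  rcases le_or_gt total 0 with hle | hpos
  · have h0 : ¬ total > 0 := by omega
    have ht0 : total.toNat = 0 := Int.toNat_of_nonpos hle
    simp only [ht0, h0, if_false, Nat.zero_div, Nat.zero_mod, Nat.zero_add]
    norm_num
  · have hgpos : (0 : Int) < (g : Int) := by exact_mod_cast hg
    have htn : ((total.toNat : Int)) = total := Int.toNat_of_nonneg (le_of_lt hpos)
    have hfd : PySem.Int.floordiv total (g : Int) = ((total.toNat / g : Nat) : Int) := by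
      rw [← htn]; exact_mod_cast PySem.Int.floordiv_natCast total.toNat g
    have hmd : PySem.Int.mod total (g : Int) = ((total.toNat % g : Nat) : Int) := by
      rw [← htn]; exact_mod_cast PySem.Int.mod_natCast total.toNat g
    simp only [hpos, if_true, hfd, hmd]
    simp only [Nat.cast_add, Nat.cast_ite, Nat.cast_one, Nat.cast_zero, Nat.cast_lt, zero_add]

-- shifting the start of enumerate
lemma enumerate_shift {α : Type} (l : List α) : ∀ (s : Int),
    PySem.List.enumerate l (s + 1) = (PySem.List.enumerate l s).map (fun p => (p.1 + 1, p.2)) := by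
  induction l with
  | nil => intro s; simp [PySem.List.enumerate_nil]
  | cons x xs ih => intro s; rw [PySem.List.enumerate_cons, PySem.List.enumerate_cons, List.map_cons, ih (s + 1)]

-- A's output loop vs B's pieces/join loop, once the per-gap space blocks agree
lemma fold_main (l : List String) (f b : Int → List Char)
    (hfb : ∀ (j : Nat), j < l.length → f ((j : Int) + 1) = b (j : Int)) (w0 : List Char) :
    List.foldl (fun acc p => (if p.1 > 0 then acc ++ f p.1 else acc) ++ p.2.toList) w0
        (PySem.List.enumerate l 1)
      = List.foldl (fun acc p => acc ++ (b p.1 ++ p.2.toList)) w0 (PySem.List.enumerate l 0) := by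
  have hbody : (fun (acc : List Char) (p : Int × String) =>
        (if p.1 > 0 then acc ++ f p.1 else acc) ++ p.2.toList)
      = fun acc p => acc ++ ((if p.1 > 0 then f p.1 else []) ++ p.2.toList) := by
    funext acc p; split_ifs <;> simp
  rw [hbody, PySem.List.foldl_append_eq_flatMap, PySem.List.foldl_append_eq_flatMap]
  congr 1
  have hsh : PySem.List.enumerate l 1 = (PySem.List.enumerate l 0).map (fun p => (p.1 + 1, p.2)) := by
    simpa using enumerate_shift l 0
  rw [hsh, List.flatMap_map]
  apply List.flatMap_congr
  intro p hp
  rcases (PySem.List.mem_enumerate_iff l 0 p).mp hp with ⟨j, hj, rfl⟩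
  simp only [zero_add]
  rw [if_pos (by omega : ((j : Int) + 1) > 0), hfb j hj]

-- ===== VERDICT (by name: the statement is the Claim_ definition above) =====
theorem create_line_spec : Claim_equal_create_line := by
  intro words length_count k _ hpre
  unfold Spec_create_line
  match words with
  | [] => exact absurd rfl hpre
  | [w] =>
    simp only [create_line, create_line_alt]
    norm_num
    congr 2
    omega
  | w0 :: w1 :: rest' =>
    have hlen : (w0 :: w1 :: rest').length > 1 := by simp
    simp only [create_line, create_line_alt]
    rw [if_pos hlen, if_pos hlen]
    have hg1 : (w0 :: w1 :: rest').length - 1 = (w1 :: rest').length := by simp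
    have hg2 : ((w0 :: w1 :: rest').length : Int) - 1 = ((w1 :: rest').length : Int) := by
      push_cast [List.length_cons]; ring
    rw [hg1, hg2]
    set sp := fillA (k - length_count + ↑(w1 :: rest').length).toNat 0 (w1 :: rest').length
      (List.replicate (w1 :: rest').length 0) with hsp
    set brv := (if k - length_count + ((w1 :: rest').length : Int) > 0 then
        (PySem.Int.floordiv (k - length_count + ((w1 :: rest').length : Int)) ((w1 :: rest').length : Int),
          PySem.Int.mod (k - length_count + ((w1 :: rest').length : Int)) ((w1 :: rest').length : Int))
      else ((0 : Int), (0 : Int))) with hbr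
    rw [PySem.List.enumerate_cons]
    simp only [List.foldl_cons, gt_iff_lt, lt_self_iff_false, if_false, List.nil_append, zero_add]
    refine congrArg String.ofList (fold_main (w1 :: rest')
      (fun idx => List.replicate (PySem.List.pyGetD sp (idx - 1) 0).toNat ' ')
      (fun i => List.replicate (brv.1 + if i < brv.2 then 1 else 0).toNat ' ')
      (fun j hj => ?_) w0.toList)
    beta_reduce
    have h1 : (j : Int) + 1 - 1 = (j : Int) := by ring
    rw [h1, PySem.List.pyGetD_natCast, hsp, hbr,
      spaces_closed (w1 :: rest').length (by simp) (k - length_count + ((w1 :: rest').length : Int)) j hj]
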